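-- pv_equiv track=rewrite | github.com/taikivvv1008-dev/loto-site | engines/scripts/verify_rules.py | loto7_rhythm_stair
-- ===== SOURCE A (Python) =====
-- from typing import List, Tuple, Dict, Iterable, Optional
--
-- def loto7_rhythm_stair(nums: List[int], diffs=(3,4), min_len=4) -> bool:
--     # ⑦リズム会談法：+3 or +4 の等差っぽい並びが長さmin_len以上あるか（簡易判定）
--     s = sorted(nums)
--     # DP: for each i, length of chain ending at i for each diff
--     for d in diffs:
--         best = 1
--         dp = {x:1 for x in s}
--         for x in s:
--             dp[x] = dp.get(x - d, 0) + 1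
--             best = max(best, dp[x])
--         if best >= min_len:
--             return True
--     return False
-- ===== SOURCE B (Python) =====
-- def loto7_rhythm_stair(nums, diffs=(3, 4), min_len=4):
--     # Set-based rewrite: no sort, no dp table — for each value walk back along
--     # x-d, x-2d, ... counting the run that ends at x, and keep the maximum.
--     s = set(nums)
--     for d in diffs:
--         best = 1
--         if d != 0:  # a zero step cannot extend a run (and the walk would not terminate)
--             for x in s:
--                 cnt = 1
--                 y = x - d
--                 while y in s:
--                     cnt += 1
--                     y -= d
--                 best = max(best, cnt)
--         if best >= min_len:
--             return True
--     return False
-- ===== Notes on version B (the rewrite author's own statement) =====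
-- stated objective: simpler
-- what changed: B drops A's sort and dp dictionary entirely: it builds a set of the values and, for each diff d, walks backward x, x-d, x-2d, ... from each value counting the run that ends there, tracking the maximum run length. Pre_ excludes inputs where some step d <= 0 occurs while min_len lies in the reachable window 2..len(nums)+1: there A's ascending dp pass reads entries it has not finalised (capping every negative-step run at 2, and counting multiplicity+1 for d = 0), an accident of the implementation that B, which counts genuine runs, does not reproduce.
-- outside the precondition, e.g. on loto7_rhythm_stair([5], (0,), 2): A returns True, B returns False; on loto7_rhythm_stair([1, 4, 7], (-3,), 3): A returns False, B returns True
import Mathlib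
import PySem

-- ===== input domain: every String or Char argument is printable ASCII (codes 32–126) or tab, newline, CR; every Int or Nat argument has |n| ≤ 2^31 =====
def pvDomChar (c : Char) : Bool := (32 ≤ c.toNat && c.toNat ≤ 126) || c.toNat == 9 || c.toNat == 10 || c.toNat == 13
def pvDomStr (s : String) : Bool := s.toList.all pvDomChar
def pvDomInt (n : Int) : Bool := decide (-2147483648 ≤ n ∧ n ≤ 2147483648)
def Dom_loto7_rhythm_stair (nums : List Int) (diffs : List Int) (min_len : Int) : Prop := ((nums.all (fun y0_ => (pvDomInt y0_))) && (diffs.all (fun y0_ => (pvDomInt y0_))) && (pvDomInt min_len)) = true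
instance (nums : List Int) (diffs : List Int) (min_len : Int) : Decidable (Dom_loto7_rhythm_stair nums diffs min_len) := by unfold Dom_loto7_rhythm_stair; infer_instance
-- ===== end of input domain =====

-- B replaces A's sort + dp dictionary with a set and, per value, a backward walk
-- counting the run that ends there (objective: simpler — no sort, no dp table).

-- ===== PORT A =====
-- dp = {x:1 for x in s}
def pvDictInit (s : List Int) : PySem.Dict Int Int :=
  s.foldl (fun d x => d.insert x 1) PySem.Dict.empty

-- one iteration of A's inner loop: dp[x] = dp.get(x-d,0)+1; best = max(best, dp[x])
def pvStepA (d : Int) (st : PySem.Dict Int Int × Int) (x : Int) : PySem.Dict Int Int × Int :=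
  let v := st.1.getD (x - d) 0 + 1
  (st.1.insert x v, max st.2 v)

-- A's body for one diff d: the final 'best'
def pvBestA (s : List Int) (d : Int) : Int :=
  (s.foldl (pvStepA d) (pvDictInit s, 1)).2

-- the 'for d in diffs: … if best >= min_len: return True' loop
def pvLoopA (s : List Int) (min_len : Int) : List Int → Bool
  | [] => false
  | d :: rest => if pvBestA s d ≥ min_len then true else pvLoopA s min_len rest

def loto7_rhythm_stair (nums : List Int) (diffs : List Int) (min_len : Int) : Bool :=
  pvLoopA (PySem.List.sorted nums (fun x => x)) min_len diffs

-- ===== PORT B =====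
-- B's inner while loop 'y = x - d; while y in s: cnt += 1; y -= d' starting from cnt = 1.
-- Fuel s.length always suffices: for d ≠ 0 the walk visits distinct members of s.
def pvWalkB (s : PySem.Set Int) (d : Int) : Nat → Int → Int
  | 0, _ => 1
  | n + 1, y => if PySem.Set.contains s (y - d) then 1 + pvWalkB s d n (y - d) else 1

-- B's body for one diff d ('if d != 0: for x in s: …' max of run lengths, else best stays 1)
def pvBestB (s : PySem.Set Int) (d : Int) : Int :=
  if d ≠ 0 then
    s.foldl (fun best x => max best (pvWalkB s d s.length x)) 1
  else 1

def pvLoopB (s : PySem.Set Int) (min_len : Int) : List Int → Bool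
  | [] => false
  | d :: rest => if pvBestB s d ≥ min_len then true else pvLoopB s min_len rest

def loto7_rhythm_stair_alt (nums : List Int) (diffs : List Int) (min_len : Int) : Bool :=
  pvLoopB (PySem.Set.ofList nums) min_len diffs

-- ===== PRECONDITION & SPEC =====
-- Pre_ excludes only inputs where some step d ≤ 0 occurs while min_len lies in the reachable
-- window 2 … len(nums)+1: there A's dp reads entries the ascending pass has not finalised
-- (for d < 0 it caps every run at 2; for d = 0 it counts multiplicity+1), an accident of the
-- implementation that B, which counts genuine runs, does not reproduce.
def Pre_loto7_rhythm_stair (nums : List Int) (diffs : List Int) (min_len : Int) : Prop :=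
  (∀ d ∈ diffs, 0 < d) ∨ min_len ≤ 1 ∨ (nums.length : Int) + 1 < min_len
instance (nums : List Int) (diffs : List Int) (min_len : Int) : Decidable (Pre_loto7_rhythm_stair nums diffs min_len) := by unfold Pre_loto7_rhythm_stair; infer_instance

def pvWitness_loto7_rhythm_stair : List Int × List Int × Int := ([10, 3, 7, 6, 9], [3, 4], 3)

def Spec_loto7_rhythm_stair (nums : List Int) (diffs : List Int) (min_len : Int) (out : Bool) : Prop := out = loto7_rhythm_stair_alt nums diffs min_len
instance (nums : List Int) (diffs : List Int) (min_len : Int) (out : Bool) : Decidable (Spec_loto7_rhythm_stair nums diffs min_len out) := by unfold Spec_loto7_rhythm_stair; infer_instance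

-- ===== CLAIM (what is proved, stated in full; the proofs are below) =====
def Claim_equal_loto7_rhythm_stair : Prop := ∀ (nums : List Int) (diffs : List Int) (min_len : Int), Dom_loto7_rhythm_stair nums diffs min_len → Pre_loto7_rhythm_stair nums diffs min_len → Spec_loto7_rhythm_stair nums diffs min_len (loto7_rhythm_stair nums diffs min_len)

-- ===== LEMMAS AND PROOFS =====

-- the run ("chain") value: pvC s d n x = length (cut off at fuel n) of the run …, x-2d, x-d, x inside s
def pvC (s : List Int) (d : Int) : Nat → Int → Int
  | 0, _ => 0
  | n + 1, x => if x ∈ s then pvC s d n (x - d) + 1 else 0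

-- full-fuel run value
def pvCF (s : List Int) (d : Int) (x : Int) : Int :=
  pvC s d (s.length + 1) x

lemma pvC_succ (s : List Int) (d : Int) (n : Nat) (x : Int) :
    pvC s d (n + 1) x = if x ∈ s then pvC s d n (x - d) + 1 else 0 := rfl

lemma pvC_nonneg (s : List Int) (d : Int) : ∀ (n : Nat) (x : Int), 0 ≤ pvC s d n x := by
  intro n
  induction n with
  | zero => intro x; simp [pvC]
  | succ n ih =>
    intro x
    rw [pvC_succ]
    split
    · have := ih (x - d); omega
    · omega

lemma pvC_succ_cases (s : List Int) (d : Int) :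
    ∀ (n : Nat) (x : Int), pvC s d (n + 1) x = pvC s d n x ∨ pvC s d (n + 1) x = n + 1 := by
  intro n
  induction n with
  | zero =>
    intro x
    rw [pvC_succ]
    split <;> simp [pvC]
  | succ n ih =>
    intro x
    rw [pvC_succ s d (n + 1) x, pvC_succ s d n x]
    by_cases hx : x ∈ s
    · rw [if_pos hx, if_pos hx]
      rcases ih (x - d) with h | h
      · left; omega
      · right; omega
    · left; rw [if_neg hx, if_neg hx]

lemma pvC_le_filter (s : List Int) (d : Int) (hd : 0 < d) :
    ∀ (n : Nat) (x : Int), pvC s d n x ≤ ((s.toFinset.filter (fun z => z ≤ x)).card : Int) := by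
  intro n
  induction n with
  | zero => intro x; simp [pvC]
  | succ n ih =>
    intro x
    rw [pvC_succ]
    split
    · rename_i hx
      have h1 := ih (x - d)
      have hsub : s.toFinset.filter (fun z => z ≤ x - d) ⊆ s.toFinset.filter (fun z => z ≤ x) := by
        intro z hz
        simp only [Finset.mem_filter] at *
        exact ⟨hz.1, by omega⟩
      have hxmem : x ∈ s.toFinset.filter (fun z => z ≤ x) := by
        simp [Finset.mem_filter, List.mem_toFinset, hx]
      have hxnot : x ∉ s.toFinset.filter (fun z => z ≤ x - d) := by
        simp only [Finset.mem_filter]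
        intro h; omega
      have hlt : (s.toFinset.filter (fun z => z ≤ x - d)).card <
          (s.toFinset.filter (fun z => z ≤ x)).card :=
        Finset.card_lt_card (Finset.ssubset_iff_of_subset hsub |>.mpr ⟨x, hxmem, hxnot⟩)
      have := Int.ofNat_le.mpr (Nat.succ_le_of_lt hlt)
      push_cast at this ⊢
      omega
    · positivity

lemma pvC_le_len (s : List Int) (d : Int) (hd : 0 < d) (hnd : s.Nodup)
    (n : Nat) (x : Int) : pvC s d n x ≤ (s.length : Int) := by
  have h1 := pvC_le_filter s d hd n x
  have h2 : (s.toFinset.filter (fun z => z ≤ x)).card ≤ s.toFinset.card :=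
    Finset.card_filter_le _ _
  have h3 : s.toFinset.card = s.length := List.toFinset_card_of_nodup hnd
  omega

lemma pvCF_of_not_mem (s : List Int) (d : Int) {x : Int} (h : x ∉ s) : pvCF s d x = 0 := by
  simp [pvCF, pvC, h]

lemma pvCF_of_mem (s : List Int) (d : Int) (hd : 0 < d) (hnd : s.Nodup)
    {x : Int} (hx : x ∈ s) : pvCF s d x = pvCF s d (x - d) + 1 := by
  have hstab : pvC s d (s.length + 1 + 1) x = pvC s d (s.length + 1) x := by
    rcases pvC_succ_cases s d (s.length + 1) x with h | h
    · exact h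
    · exfalso
      have := pvC_le_len s d hd hnd (s.length + 1 + 1) x
      omega
  have : pvC s d (s.length + 1 + 1) x = pvC s d (s.length + 1) (x - d) + 1 := by
    rw [pvC_succ, if_pos hx]
  simp only [pvCF]
  omega

-- B's walk computes the full-fuel run value once the fuel dominates it
lemma pvWalkB_eq_pvCF (s : PySem.Set Int) (d : Int) (hd : 0 < d) (hnd : List.Nodup s) :
    ∀ (n : Nat) (y : Int), y ∈ s → pvCF s d y ≤ (n : Int) + 1 → pvWalkB s d n y = pvCF s d y := by
  intro n
  induction n with
  | zero =>
    intro y hy hle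
    have h1 := pvCF_of_mem s d hd hnd hy
    have h2 := pvC_nonneg s d (s.length + 1) (y - d)
    simp only [pvCF] at *
    simp only [pvWalkB]
    omega
  | succ n ih =>
    intro y hy hle
    have hrec := pvCF_of_mem s d hd hnd hy
    by_cases hm : (y - d) ∈ s
    · have hcont : PySem.Set.contains s (y - d) = true := by
        simp [PySem.Set.contains, List.contains_eq_mem, hm]
      have hle' : pvCF s d (y - d) ≤ (n : Int) + 1 := by push_cast at hle ⊢; omega
      have := ih (y - d) hm hle'
      simp only [pvWalkB, hcont, if_pos]
      omega
    · have hcont : PySem.Set.contains s (y - d) = false := by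
        simp [PySem.Set.contains, List.contains_eq_mem, hm]
      have h0 := pvCF_of_not_mem s d hm
      simp only [pvWalkB, hcont]
      simp
      omega

lemma pvWalkB_le (s : PySem.Set Int) (d : Int) :
    ∀ (n : Nat) (y : Int), pvWalkB s d n y ≤ (n : Int) + 1 := by
  intro n
  induction n with
  | zero => intro y; simp [pvWalkB]
  | succ n ih =>
    intro y
    simp only [pvWalkB]
    split
    · have := ih (y - d); push_cast; omega
    · push_cast; omega

-- running max over a list of projected values: upper-bound characterisation
lemma pvFoldMax_le_iff (f : Int → Int) (l : List Int) :
    ∀ (b c : Int), l.foldl (fun acc x => max acc (f x)) b ≤ c ↔ b ≤ c ∧ ∀ x ∈ l, f x ≤ c := by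
  induction l with
  | nil => intro b c; simp
  | cons x t ih =>
    intro b c
    simp only [List.foldl_cons, ih]
    constructor
    · rintro ⟨h1, h2⟩
      rw [max_le_iff] at h1
      refine ⟨h1.1, fun z hz => ?_⟩
      rcases List.mem_cons.mp hz with rfl | hz
      · exact h1.2
      · exact h2 z hz
    · rintro ⟨h1, h2⟩
      exact ⟨max_le h1 (h2 x (List.mem_cons_self ..)),
        fun z hz => h2 z (List.mem_cons_of_mem _ hz)⟩

lemma pvFoldMax_congr_mem (f : Int → Int) (l₁ l₂ : List Int) (b : Int)
    (h : ∀ x, x ∈ l₁ ↔ x ∈ l₂) :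
    l₁.foldl (fun acc x => max acc (f x)) b = l₂.foldl (fun acc x => max acc (f x)) b := by
  have A₁ := PySem.List.le_foldl_max_int l₁ f b
  have A₂ := PySem.List.le_foldl_max_int l₂ f b
  apply le_antisymm
  · exact (pvFoldMax_le_iff f l₁ b _).mpr ⟨A₂.1, fun x hx => A₂.2 x ((h x).mp hx)⟩
  · exact (pvFoldMax_le_iff f l₂ b _).mpr ⟨A₁.1, fun x hx => A₁.2 x ((h x).mpr hx)⟩

-- the initial dict {x:1 for x in s}
lemma pvDictInit_get? (s : List Int) (z : Int) :
    (pvDictInit s).get? z = if z ∈ s then some 1 else none := by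
  suffices h : ∀ (dct : PySem.Dict Int Int),
      (s.foldl (fun d x => d.insert x 1) dct).get? z =
        if z ∈ s then some 1 else dct.get? z by
    have := h PySem.Dict.empty
    simpa [pvDictInit, PySem.Dict.get?_empty] using this
  induction s with
  | nil => intro dct; simp
  | cons x t ih =>
    intro dct
    simp only [List.foldl_cons, ih, List.mem_cons]
    by_cases hz : z ∈ t
    · simp [hz]
    · by_cases hzx : z = x
      · subst hzx
        simp [hz, PySem.Dict.get?_insert_self]
      · simp [hz, hzx, PySem.Dict.get?_insert_of_ne dct 1 hzx]

-- A's dp pass along the ascending list computes the run values: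
-- the final best equals the running max of pvCF over the processed list
lemma pvFoldA_best (S : List Int) (d : Int) (hd : 0 < d) (hnd : S.Nodup) :
    ∀ (rest : List Int) (dp : PySem.Dict Int Int) (best : Int),
      rest.Pairwise (· ≤ ·) →
      (∀ x ∈ rest, x ∈ S) →
      (∀ z, z ∉ S → dp.get? z = none) →
      (∀ z, z ∈ S → (∀ r ∈ rest, z < r) → dp.get? z = some (pvCF S d z)) →
      (∀ z, z ∈ S → z ∈ rest ∨ (∀ r ∈ rest, z ≤ r)) →
      (rest.foldl (pvStepA d) (dp, best)).2
        = rest.foldl (fun b x => max b (pvCF S d x)) best := by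
  intro rest
  induction rest with
  | nil => intro dp best _ _ _ _ _; simp
  | cons x t ih =>
    intro dp best hpw hmem I0 I1 Hsplit
    have hxS : x ∈ S := hmem x (List.mem_cons_self ..)
    have hxt : ∀ r ∈ t, x ≤ r := (List.pairwise_cons.mp hpw).1
    -- the written value is the run value at x
    have hv : dp.getD (x - d) 0 + 1 = pvCF S d x := by
      by_cases hmd : (x - d) ∈ S
      · have hbelow : ∀ r ∈ x :: t, x - d < r := by
          intro r hr
          rcases List.mem_cons.mp hr with rfl | hr
          · omega
          · have := hxt r hr; omega
        have := I1 (x - d) hmd hbelow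
        rw [PySem.Dict.getD_eq_get?_getD, this]
        simp [pvCF_of_mem S d hd hnd hxS]
      · have := I0 (x - d) hmd
        rw [PySem.Dict.getD_eq_get?_getD, this]
        simp [pvCF_of_mem S d hd hnd hxS, pvCF_of_not_mem S d hmd]
    have hstep : pvStepA d (dp, best) x
        = (dp.insert x (pvCF S d x), max best (pvCF S d x)) := by
      simp only [pvStepA, hv]
    simp only [List.foldl_cons, hstep]
    apply ih
    · exact (List.pairwise_cons.mp hpw).2
    · intro r hr; exact hmem r (List.mem_cons_of_mem _ hr)
    · intro z hz
      have hzx : z ≠ x := fun h => hz (h ▸ hxS)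
      rw [PySem.Dict.get?_insert_of_ne _ _ hzx]
      exact I0 z hz
    · intro z hzS hbel
      by_cases hzx : z = x
      · subst hzx
        exact PySem.Dict.get?_insert_self _ _ _
      · rw [PySem.Dict.get?_insert_of_ne _ _ hzx]
        apply I1 z hzS
        intro r hr
        rcases List.mem_cons.mp hr with rfl | hr
        · -- r = x : show z < x
          have hnt : z ∉ t := fun h => absurd (hbel z h) (lt_irrefl z)
          rcases Hsplit z hzS with hin | hle
          · rcases List.mem_cons.mp hin with rfl | hin
            · exact absurd rfl hzx
            · exact absurd hin hnt
          · have := hle r (List.mem_cons_self ..)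
            omega
        · exact hbel r hr
    · intro z hzS
      rcases Hsplit z hzS with hin | hle
      · rcases List.mem_cons.mp hin with rfl | hin
        · right; exact hxt
        · left; exact hin
      · right; intro r hr; exact hle r (List.mem_cons_of_mem _ hr)

-- per-diff equality for a positive step
lemma pvBest_eq (nums : List Int) (d : Int) (hd : 0 < d) :
    pvBestA (PySem.List.sorted nums (fun x => x)) d = pvBestB (PySem.Set.ofList nums) d := by
  set S : PySem.Set Int := PySem.Set.ofList nums with hS
  set srt : List Int := PySem.List.sorted nums (fun x => x) with hsrt
  have hnd : S.Nodup := PySem.Set.nodup_ofList nums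
  have hmemS : ∀ z, z ∈ S ↔ z ∈ nums := fun z => PySem.Set.mem_ofList nums z
  have hmemsrt : ∀ z, z ∈ srt ↔ z ∈ nums := fun z => PySem.List.mem_sorted nums _ false z
  -- A side
  have hA : pvBestA srt d = srt.foldl (fun b x => max b (pvCF S d x)) 1 := by
    apply pvFoldA_best S d hd hnd srt (pvDictInit srt) 1
    · exact PySem.List.sorted_pairwise nums (fun x => x)
    · intro x hx; exact (hmemS x).mpr ((hmemsrt x).mp hx)
    · intro z hz
      rw [pvDictInit_get?]
      have : z ∉ srt := fun h => hz ((hmemS z).mpr ((hmemsrt z).mp h))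
      simp [this]
    · intro z hzS hbel
      exact absurd (hbel z ((hmemsrt z).mpr ((hmemS z).mp hzS))) (lt_irrefl z)
    · intro z hzS
      left; exact (hmemsrt z).mpr ((hmemS z).mp hzS)
  -- B side
  have hB : pvBestB S d = S.foldl (fun b x => max b (pvCF S d x)) 1 := by
    have hdne : d ≠ 0 := by omega
    simp only [pvBestB, if_pos hdne, ne_eq]
    apply PySem.List.foldl_congr_mem
    intro acc x hx
    congr 1
    apply pvWalkB_eq_pvCF S d hd hnd
    · exact hx
    · have := pvC_le_len S d hd hnd (S.length + 1) x
      simp only [pvCF]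
      omega
  rw [hA, hB]
  exact pvFoldMax_congr_mem _ _ _ _ (fun x => (hmemsrt x).trans (hmemS x).symm)

-- 1 ≤ best, on both sides
lemma pvBestA_ge_one (s : List Int) (d : Int) : 1 ≤ pvBestA s d := by
  suffices h : ∀ (rest : List Int) (dp : PySem.Dict Int Int) (best : Int),
      best ≤ (rest.foldl (pvStepA d) (dp, best)).2 by
    exact h s (pvDictInit s) 1
  intro rest
  induction rest with
  | nil => intro dp best; simp
  | cons x t ih =>
    intro dp best
    simp only [List.foldl_cons, pvStepA]
    calc best ≤ max best (dp.getD (x - d) 0 + 1) := le_max_left _ _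
      _ ≤ _ := ih _ _

lemma pvBestB_ge_one (s : PySem.Set Int) (d : Int) : 1 ≤ pvBestB s d := by
  by_cases hd : d ≠ 0
  · simp only [pvBestB, if_pos hd]
    exact (PySem.List.le_foldl_max_int s (fun x => pvWalkB s d s.length x) 1).1
  · simp [pvBestB, hd]

-- best stays below (number of processed values) + (bound on the dict's values)
lemma pvBestA_le_aux (d : Int) :
    ∀ (rest : List Int) (dp : PySem.Dict Int Int) (best : Int) (m : Int),
      0 ≤ m → (∀ z v, dp.get? z = some v → v ≤ m) → best ≤ m →
      (rest.foldl (pvStepA d) (dp, best)).2 ≤ m + rest.length := by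
  intro rest
  induction rest with
  | nil => intro dp best m _ _ hb; simpa using hb
  | cons x t ih =>
    intro dp best m hm hdp hb
    simp only [List.foldl_cons, pvStepA]
    have hv : dp.getD (x - d) 0 + 1 ≤ m + 1 := by
      rw [PySem.Dict.getD_eq_get?_getD]
      cases hgd : dp.get? (x - d) with
      | none => simpa using hm
      | some v => have := hdp _ _ hgd; simpa using this
    have := ih (dp.insert x (dp.getD (x - d) 0 + 1)) (max best (dp.getD (x - d) 0 + 1)) (m + 1)
      (by omega)
      (by
        intro z v hz
        rw [PySem.Dict.get?_insert] at hz
        split at hz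
        · injection hz with hz1
          omega
        · have := hdp _ _ hz; omega)
      (max_le (by omega) hv)
    simp only [List.length_cons]
    push_cast at this ⊢
    omega

lemma pvBestA_le (s : List Int) (d : Int) : pvBestA s d ≤ (s.length : Int) + 1 := by
  have := pvBestA_le_aux d s (pvDictInit s) 1 1 (by omega)
    (by
      intro z v hz
      rw [pvDictInit_get?] at hz
      split at hz
      · injection hz with hz1
        omega
      · simp at hz)
    (le_refl 1)
  simp only [pvBestA]
  omega

lemma pvSet_len_le (nums : List Int) : (PySem.Set.ofList nums).length ≤ nums.length := by
  suffices h : ∀ (l : List Int) (s : PySem.Set Int),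
      (l.foldl PySem.Set.add s).length ≤ s.length + l.length by
    simpa [PySem.Set.ofList_eq_foldl] using h nums []
  intro l
  induction l with
  | nil => intro s; simp
  | cons x t ih =>
    intro s
    simp only [List.foldl_cons, List.length_cons]
    have hadd : (PySem.Set.add s x).length ≤ s.length + 1 := by
      simp only [PySem.Set.add]
      split <;> simp
    have := ih (PySem.Set.add s x)
    omega

lemma pvBestB_le (s : PySem.Set Int) (d : Int) : pvBestB s d ≤ (s.length : Int) + 1 := by
  by_cases hd : d ≠ 0
  · simp only [pvBestB, if_pos hd]
    apply (pvFoldMax_le_iff _ _ _ _).mpr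
    constructor
    · omega
    · intro x _; exact pvWalkB_le s d s.length x
  · simp only [pvBestB, if_neg hd]; omega

-- ===== VERDICT (by name: the statement is the Claim_ definition above) =====
theorem loto7_rhythm_stair_spec : Claim_equal_loto7_rhythm_stair := by
  intro nums diffs min_len hdom hpre
  clear hdom
  unfold Spec_loto7_rhythm_stair loto7_rhythm_stair loto7_rhythm_stair_alt
  rcases hpre with hpos | hml | hlen
  · -- all steps positive: the per-diff bests coincide
    induction diffs with
    | nil => rfl
    | cons d rest ih =>
      have hd : 0 < d := hpos d (List.mem_cons_self ..)
      simp only [pvLoopA, pvLoopB, pvBest_eq nums d hd]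
      split
      · rfl
      · exact ih (fun x hx => hpos x (List.mem_cons_of_mem _ hx))
  · -- min_len ≤ 1: first diff (if any) returns True on both sides
    cases diffs with
    | nil => rfl
    | cons d rest =>
      have hA := pvBestA_ge_one (PySem.List.sorted nums (fun x => x)) d
      have hB := pvBestB_ge_one (PySem.Set.ofList nums) d
      simp only [pvLoopA, pvLoopB]
      rw [if_pos (by omega), if_pos (by omega)]
  · -- min_len beyond len+1: every best is below it, both loops fall through
    induction diffs with
    | nil => rfl
    | cons d rest ih =>
      have hA := pvBestA_le (PySem.List.sorted nums (fun x => x)) d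
      have hB := pvBestB_le (PySem.Set.ofList nums) d
      have hsl : ((PySem.List.sorted nums (fun x => x)).length : Int) = nums.length := by
        rw [PySem.List.length_sorted]
      have hbl : ((PySem.Set.ofList nums).length : Int) ≤ nums.length := by
        exact_mod_cast pvSet_len_le nums
      simp only [pvLoopA, pvLoopB]
      rw [if_neg (by omega), if_neg (by omega)]
      exact ih
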